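-- pv_equiv track=rewrite | github.com/mandar-karhade/bioassert | bioassert/generator/post_process.py | _slot_boundary_space_positions
-- ===== SOURCE A (Python) =====
-- def _slot_boundary_space_positions(
--     sentence: str, spans: dict[str, tuple[int, int]]
-- ) -> list[int]:
--     """Return space positions that are immediately adjacent to a labeled span.
--
--     A space at index ``i`` qualifies when either ``i == span_end`` for some
--     labeled span (the space sits directly after a slot) or
--     ``i + 1 == span_start`` (the space sits directly before a slot).
--     Prose-interior spaces (between frame connective words like ``was`` and
--     ``found to be``) are excluded so Bug 3a cannot reappear.
--     """
--     boundaries: set[int] = set()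
--     for start, end in spans.values():
--         if start - 1 >= 0 and sentence[start - 1] == " ":
--             boundaries.add(start - 1)
--         if end < len(sentence) and sentence[end] == " ":
--             boundaries.add(end)
--     return sorted(boundaries)
-- ===== SOURCE B (Python) =====
-- def _slot_boundary_space_positions(
--     sentence: str, spans: dict[str, tuple[int, int]]
-- ) -> list[int]:
--     starts = {s for s, _ in spans.values()}
--     ends = {e for _, e in spans.values()}
--     return [
--         i
--         for i, ch in enumerate(sentence)
--         if ch == " " and (i in ends or i + 1 in starts)
--     ]
-- ===== Notes on version B (the rewrite author's own statement) =====
-- stated objective: alternative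
-- what changed: A loops over the spans, probing the sentence at each span edge, accumulating hits in a set and sorting at the end; B precomputes the start/end index sets from the spans and then makes one left-to-right scan over the sentence (enumerate), emitting each space position adjacent to a boundary, so the result comes out sorted and deduplicated with no final sort.
-- intended difference: On spans whose end is negative but in range (-len(sentence) <= end <= -1) at a space character, A's negative-index wraparound reads sentence[end] from the right and includes the negative position end itself in its result; B reports only real non-negative space positions, which is the intended meaning of 'space positions adjacent to a labeled span'. — e.g. on _slot_boundary_space_positions(" ", [("x", 0, -1)]): A returns [-1], B returns []
import Mathlib
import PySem

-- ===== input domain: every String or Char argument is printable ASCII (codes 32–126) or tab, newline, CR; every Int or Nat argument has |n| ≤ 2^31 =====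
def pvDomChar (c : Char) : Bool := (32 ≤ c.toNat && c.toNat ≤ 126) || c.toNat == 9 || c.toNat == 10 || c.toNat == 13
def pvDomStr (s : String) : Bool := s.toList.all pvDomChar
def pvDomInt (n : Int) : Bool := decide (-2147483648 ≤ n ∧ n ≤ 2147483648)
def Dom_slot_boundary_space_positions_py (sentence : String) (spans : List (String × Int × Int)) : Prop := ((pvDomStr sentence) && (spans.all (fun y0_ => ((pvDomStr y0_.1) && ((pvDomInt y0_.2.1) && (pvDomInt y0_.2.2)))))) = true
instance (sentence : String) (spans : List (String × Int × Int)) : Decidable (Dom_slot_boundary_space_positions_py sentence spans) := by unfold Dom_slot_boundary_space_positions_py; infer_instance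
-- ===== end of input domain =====

-- B replaces A's span-loop (probe the sentence at each span edge, collect in a set, sort)
-- by one left-to-right scan over the sentence itself against two precomputed index sets,
-- producing the result already sorted (objective: alternative; same cost).

-- ===== PORT A =====
def slot_boundary_space_positions_py (sentence : String) (spans : List (String × Int × Int)) : List Int :=
  let boundaries : PySem.Set Int :=
    ((PySem.Dict.ofList spans).values).foldl (fun b se =>
      let b1 := if 0 ≤ se.1 - 1 ∧ PySem.Str.pyGet? sentence (se.1 - 1) = some ' '
                then PySem.Set.add b (se.1 - 1) else b
      if se.2 < PySem.Str.len sentence ∧ PySem.Str.pyGet? sentence se.2 = some ' '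
      then PySem.Set.add b1 se.2 else b1)
      PySem.Set.empty
  PySem.List.sorted boundaries (fun x => x)

-- ===== PORT B =====
def slot_boundary_space_positions_py_alt (sentence : String) (spans : List (String × Int × Int)) : List Int :=
  let vals := (PySem.Dict.ofList spans).values
  let starts : PySem.Set Int := PySem.Set.ofList (vals.map (·.1))
  let ends : PySem.Set Int := PySem.Set.ofList (vals.map (·.2))
  ((PySem.List.enumerate sentence.toList).filter
      (fun ic => ic.2 == ' ' && (decide (ic.1 ∈ ends) || decide (ic.1 + 1 ∈ starts)))).map (·.1)

-- ===== PRECONDITION & SPEC =====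
-- Pre_ excludes exactly the inputs on which the Python A raises IndexError: a span start past
-- the end of the sentence (start ≥ 1, start - 1 ≥ len) or a span end below -len(sentence)
-- (end < len, end < -len). Python B returns normally there.
def Pre_slot_boundary_space_positions_py (sentence : String) (spans : List (String × Int × Int)) : Prop :=
  ∀ p ∈ (PySem.Dict.ofList spans).values,
    (1 ≤ p.1 → p.1 ≤ PySem.Str.len sentence) ∧
    (p.2 < PySem.Str.len sentence → -(PySem.Str.len sentence) ≤ p.2)
instance (sentence : String) (spans : List (String × Int × Int)) : Decidable (Pre_slot_boundary_space_positions_py sentence spans) := by unfold Pre_slot_boundary_space_positions_py; infer_instance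
def pvWitness_slot_boundary_space_positions_py : String × (List (String × Int × Int)) := ("a b", [("x", 2, 3)])

-- On spans whose end is negative but in range (-len ≤ end ≤ -1) at a space character, A's
-- negative-index wraparound reads sentence[end] from the right and reports the NEGATIVE
-- position end itself in its result; B reports only real (non-negative) space positions,
-- which is the intended meaning of "space positions adjacent to a labeled span".
def D_slot_boundary_space_positions_py (sentence : String) (spans : List (String × Int × Int)) : Prop :=
  ∃ p ∈ (PySem.Dict.ofList spans).values,
    -(PySem.Str.len sentence) ≤ p.2 ∧ p.2 ≤ -1 ∧ PySem.Str.pyGet? sentence p.2 = some ' '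
instance (sentence : String) (spans : List (String × Int × Int)) : Decidable (D_slot_boundary_space_positions_py sentence spans) := by unfold D_slot_boundary_space_positions_py; infer_instance
def Spec_slot_boundary_space_positions_py (sentence : String) (spans : List (String × Int × Int)) (out : List Int) : Prop := ¬ D_slot_boundary_space_positions_py sentence spans → out = slot_boundary_space_positions_py_alt sentence spans
instance (sentence : String) (spans : List (String × Int × Int)) (out : List Int) : Decidable (Spec_slot_boundary_space_positions_py sentence spans out) := by unfold Spec_slot_boundary_space_positions_py; infer_instance
def pvDiffWitness_slot_boundary_space_positions_py : String × (List (String × Int × Int)) := (" ", [("x", 0, -1)])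
def pvDiffWitnessOut_slot_boundary_space_positions_py : (List Int) × (List Int) := ([-1], [])

-- ===== CLAIM (what is proved, stated in full; the proofs are below) =====
def Claim_unchanged_slot_boundary_space_positions_py : Prop := ∀ (sentence : String) (spans : List (String × Int × Int)), Dom_slot_boundary_space_positions_py sentence spans → Pre_slot_boundary_space_positions_py sentence spans → Spec_slot_boundary_space_positions_py sentence spans (slot_boundary_space_positions_py sentence spans)
def Claim_changed_slot_boundary_space_positions_py : Prop := Dom_slot_boundary_space_positions_py (pvDiffWitness_slot_boundary_space_positions_py.1) (pvDiffWitness_slot_boundary_space_positions_py.2) ∧ Pre_slot_boundary_space_positions_py (pvDiffWitness_slot_boundary_space_positions_py.1) (pvDiffWitness_slot_boundary_space_positions_py.2) ∧ D_slot_boundary_space_positions_py (pvDiffWitness_slot_boundary_space_positions_py.1) (pvDiffWitness_slot_boundary_space_positions_py.2) ∧ slot_boundary_space_positions_py (pvDiffWitness_slot_boundary_space_positions_py.1) (pvDiffWitness_slot_boundary_space_positions_py.2) = pvDiffWitnessOut_slot_boundary_space_positions_py.1 ∧ slot_boundary_space_positions_py_alt (pvDiffWitness_slot_boundary_space_positions_py.1)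 (pvDiffWitness_slot_boundary_space_positions_py.2) = pvDiffWitnessOut_slot_boundary_space_positions_py.2 ∧ pvDiffWitnessOut_slot_boundary_space_positions_py.1 ≠ pvDiffWitnessOut_slot_boundary_space_positions_py.2
def Claim_exact_slot_boundary_space_positions_py : Prop := ∀ (sentence : String) (spans : List (String × Int × Int)), Dom_slot_boundary_space_positions_py sentence spans → Pre_slot_boundary_space_positions_py sentence spans → D_slot_boundary_space_positions_py sentence spans → slot_boundary_space_positions_py sentence spans ≠ slot_boundary_space_positions_py_alt sentence spans

-- ===== LEMMAS AND PROOFS =====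
-- membership through one step of A's loop body
theorem pv_step_mem (sentence : String) (b : PySem.Set Int) (q : Int × Int) (x : Int) :
    (x ∈ (let b1 := if 0 ≤ q.1 - 1 ∧ PySem.Str.pyGet? sentence (q.1 - 1) = some ' '
                then PySem.Set.add b (q.1 - 1) else b
      if q.2 < PySem.Str.len sentence ∧ PySem.Str.pyGet? sentence q.2 = some ' '
      then PySem.Set.add b1 q.2 else b1)) ↔
    x ∈ b ∨ (0 ≤ q.1 - 1 ∧ PySem.Str.pyGet? sentence (q.1 - 1) = some ' ' ∧ x = q.1 - 1) ∨
      (q.2 < PySem.Str.len sentence ∧ PySem.Str.pyGet? sentence q.2 = some ' ' ∧ x = q.2) := by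
  dsimp only
  split_ifs with h1 h2 h2 <;> (try simp only [PySem.Set.mem_add]) <;> tauto

theorem pv_mem_boundaries (sentence : String) (vals : List (Int × Int)) (s : PySem.Set Int) (x : Int) :
    x ∈ vals.foldl (fun b se =>
      let b1 := if 0 ≤ se.1 - 1 ∧ PySem.Str.pyGet? sentence (se.1 - 1) = some ' '
                then PySem.Set.add b (se.1 - 1) else b
      if se.2 < PySem.Str.len sentence ∧ PySem.Str.pyGet? sentence se.2 = some ' '
      then PySem.Set.add b1 se.2 else b1) s ↔
    x ∈ s ∨ ∃ p ∈ vals,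
      (0 ≤ p.1 - 1 ∧ PySem.Str.pyGet? sentence (p.1 - 1) = some ' ' ∧ x = p.1 - 1) ∨
      (p.2 < PySem.Str.len sentence ∧ PySem.Str.pyGet? sentence p.2 = some ' ' ∧ x = p.2) := by
  induction vals generalizing s with
  | nil => simp
  | cons q t ih =>
    rw [List.foldl_cons, ih, pv_step_mem, List.exists_mem_cons_iff]
    exact or_assoc

theorem pv_nodup_boundaries (sentence : String) (vals : List (Int × Int)) (s : PySem.Set Int) (hs : s.Nodup) :
    (vals.foldl (fun b se =>
      let b1 := if 0 ≤ se.1 - 1 ∧ PySem.Str.pyGet? sentence (se.1 - 1) = some ' '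
                then PySem.Set.add b (se.1 - 1) else b
      if se.2 < PySem.Str.len sentence ∧ PySem.Str.pyGet? sentence se.2 = some ' '
      then PySem.Set.add b1 se.2 else b1) s).Nodup := by
  induction vals generalizing s with
  | nil => exact hs
  | cons q t ih =>
    refine ih _ ?_
    dsimp only
    split_ifs <;> first
      | exact hs
      | exact PySem.Set.nodup_add _ _ hs
      | exact PySem.Set.nodup_add _ _ (PySem.Set.nodup_add _ _ hs)

-- membership in B's result
theorem pv_mem_alt (sentence : String) (spans : List (String × Int × Int)) (x : Int) :
    x ∈ slot_boundary_space_positions_py_alt sentence spans ↔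
      ∃ (k : Nat) (h : k < sentence.toList.length), x = (k : Int) ∧ sentence.toList[k] = ' ' ∧
        ((k : Int) ∈ ((PySem.Dict.ofList spans).values).map (·.2) ∨
         (k : Int) + 1 ∈ ((PySem.Dict.ofList spans).values).map (·.1)) := by
  unfold slot_boundary_space_positions_py_alt
  simp only [List.mem_map, List.mem_filter, PySem.List.mem_enumerate_iff,
    PySem.Set.mem_ofList, Bool.and_eq_true, Bool.or_eq_true, beq_iff_eq, decide_eq_true_eq]
  constructor
  · rintro ⟨ic, ⟨⟨k, hk, rfl⟩, hsp, hmem⟩, rfl⟩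
    exact ⟨k, hk, by simpa using rfl, by simpa using hsp, by simpa using hmem⟩
  · rintro ⟨k, hk, rfl, hsp, hmem⟩
    exact ⟨((k : Int), sentence.toList[k]), ⟨⟨k, hk, by simp⟩, by simpa using hsp, by simpa using hmem⟩, rfl⟩

-- B's result is strictly increasing
theorem pv_alt_pairwise (sentence : String) (spans : List (String × Int × Int)) :
    (slot_boundary_space_positions_py_alt sentence spans).Pairwise (· < ·) := by
  unfold slot_boundary_space_positions_py_alt
  rw [List.pairwise_map]
  exact List.Pairwise.filter _ (PySem.List.pairwise_lt_enumerate sentence.toList 0)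

theorem pv_alt_nonneg (sentence : String) (spans : List (String × Int × Int)) (x : Int)
    (hx : x ∈ slot_boundary_space_positions_py_alt sentence spans) : 0 ≤ x := by
  rw [pv_mem_alt] at hx
  obtain ⟨k, _, rfl, -, -⟩ := hx
  exact Int.natCast_nonneg k

-- membership agreement under Pre_ and ¬D_
theorem pv_mem_agree (sentence : String) (spans : List (String × Int × Int))
    (hpre : Pre_slot_boundary_space_positions_py sentence spans)
    (hD : ¬ D_slot_boundary_space_positions_py sentence spans) (x : Int) :
    x ∈ slot_boundary_space_positions_py_alt sentence spans ↔
    x ∈ (((PySem.Dict.ofList spans).values).foldl (fun b se =>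
      let b1 := if 0 ≤ se.1 - 1 ∧ PySem.Str.pyGet? sentence (se.1 - 1) = some ' '
                then PySem.Set.add b (se.1 - 1) else b
      if se.2 < PySem.Str.len sentence ∧ PySem.Str.pyGet? sentence se.2 = some ' '
      then PySem.Set.add b1 se.2 else b1) PySem.Set.empty) := by
  rw [pv_mem_alt, pv_mem_boundaries]
  simp only [PySem.Set.empty, List.not_mem_nil, false_or, List.mem_map]
  constructor
  · rintro ⟨k, hk, rfl, hsp, ⟨p, hp, hpe⟩ | ⟨p, hp, hps⟩⟩
    · refine ⟨p, hp, Or.inr ⟨?_, ?_, hpe.symm⟩⟩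
      · rw [hpe]; simp only [PySem.Str.len_eq]; exact_mod_cast hk
      · rw [hpe]; simp [List.getElem?_eq_getElem hk, hsp]
    · refine ⟨p, hp, Or.inl ⟨by omega, ?_, by omega⟩⟩
      have h1 : p.1 - 1 = (k : Int) := by omega
      rw [h1]; simp [List.getElem?_eq_getElem hk, hsp]
  · rintro ⟨p, hp, ⟨hge, hsp, rfl⟩ | ⟨hlt, hsp, rfl⟩⟩
    · -- the "space before the span" branch: index p.1 - 1 with 0 ≤ p.1 - 1
      have hlen : p.1 ≤ (sentence.toList.length : Int) := by
        have := (hpre p hp).1 (by omega)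
        simpa [PySem.Str.len_eq] using this
      have hk : (p.1 - 1).toNat < sentence.toList.length := by omega
      refine ⟨(p.1 - 1).toNat, hk, by omega, ?_, Or.inr ⟨p, hp, by omega⟩⟩
      have h2 : sentence.toList[(p.1 - 1).toNat]? = some ' ' := by
        rw [← PySem.Str.pyGet?_natCast, show (((p.1 - 1).toNat : Nat) : Int) = p.1 - 1 by omega]
        exact hsp
      rw [List.getElem?_eq_getElem hk] at h2
      exact Option.some.inj h2
    · -- the "space after the span" branch: ¬D_ forces 0 ≤ p.2
      have hnn : 0 ≤ p.2 := by
        by_contra hneg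
        push_neg at hneg
        have hinr : -(PySem.Str.len sentence) ≤ p.2 := (hpre p hp).2 hlt
        exact hD ⟨p, hp, hinr, by omega, hsp⟩
      have hk : p.2.toNat < sentence.toList.length := by
        have : p.2 < (sentence.toList.length : Int) := by simpa [PySem.Str.len_eq] using hlt
        omega
      refine ⟨p.2.toNat, hk, by omega, ?_, Or.inl ⟨p, hp, by omega⟩⟩
      have h2 : sentence.toList[p.2.toNat]? = some ' ' := by
        rw [← PySem.Str.pyGet?_natCast, show ((p.2.toNat : Nat) : Int) = p.2 by omega]
        exact hsp
      rw [List.getElem?_eq_getElem hk] at h2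
      exact Option.some.inj h2

-- ===== VERDICT (by name: the statements are the Claim_ definitions above) =====
theorem slot_boundary_space_positions_py_spec : Claim_unchanged_slot_boundary_space_positions_py := by
  intro sentence spans _ hpre hD
  show _ = _
  unfold slot_boundary_space_positions_py
  refine PySem.List.sorted_eq_of_perm_of_pairwise_lt _ _ _ ?_ (pv_alt_pairwise sentence spans)
  refine (List.perm_ext_iff_of_nodup (pv_alt_pairwise sentence spans).nodup
    (pv_nodup_boundaries sentence _ _ List.nodup_nil)).2 ?_
  exact pv_mem_agree sentence spans hpre hD

theorem slot_boundary_space_positions_py_changed : Claim_changed_slot_boundary_space_positions_py := by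
  unfold Claim_changed_slot_boundary_space_positions_py; decide

theorem slot_boundary_space_positions_py_tight : Claim_exact_slot_boundary_space_positions_py := by
  intro sentence spans _ _ hD heq
  obtain ⟨p, hp, hge, hle, hsp⟩ := hD
  have hmemA : p.2 ∈ slot_boundary_space_positions_py sentence spans := by
    unfold slot_boundary_space_positions_py
    rw [PySem.List.mem_sorted, pv_mem_boundaries]
    have hlt : p.2 < PySem.Str.len sentence := by
      have : 1 ≤ PySem.Str.len sentence := by omega
      omega
    exact Or.inr ⟨p, hp, Or.inr ⟨hlt, hsp, rfl⟩⟩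
  rw [heq] at hmemA
  have := pv_alt_nonneg sentence spans p.2 hmemA
  omega
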